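-- pv_equiv track=rewrite | github.com/KennethJefferson/cc_sdk_knowledge_extractor | skills/project-maker/scripts/project_maker.py | _get_run_command
-- ===== SOURCE A (Python) =====
-- from typing import Dict, List, Optional, Tuple, Any
--
-- def _get_run_command(tech_stack: List[str]) -> str:
--     """Get run command based on tech stack."""
--     if 'Rust' in tech_stack:
--         return 'cargo run'
--     if any(t in tech_stack for t in ['JavaScript', 'TypeScript', 'React', 'Express']):
--         return 'npm start'
--     if any(t in tech_stack for t in ['Python', 'FastAPI', 'Flask', 'Django']):
--         return 'python main.py'
--     return 'See documentation'
-- ===== SOURCE B (Python) =====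
-- _PRIORITY = {'Rust': 0,
--              'JavaScript': 1, 'TypeScript': 1, 'React': 1, 'Express': 1,
--              'Python': 2, 'FastAPI': 2, 'Flask': 2, 'Django': 2}
-- _COMMANDS = ['cargo run', 'npm start', 'python main.py', 'See documentation']
--
-- def _get_run_command(tech_stack):
--     """Get run command based on tech stack."""
--     best = 3
--     for t in tech_stack:
--         p = _PRIORITY.get(t, 3)
--         if p < best:
--             best = p
--     return _COMMANDS[best]
-- ===== Notes on version B (the rewrite author's own statement) =====
-- stated objective: alternative
-- what changed: Replaces A's staged if/any scans of the stack per tech group with a single pass over tech_stack that folds a minimum priority (per-tech priority from a dict) and indexes a command table with the resulting minimum.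
import Mathlib
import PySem

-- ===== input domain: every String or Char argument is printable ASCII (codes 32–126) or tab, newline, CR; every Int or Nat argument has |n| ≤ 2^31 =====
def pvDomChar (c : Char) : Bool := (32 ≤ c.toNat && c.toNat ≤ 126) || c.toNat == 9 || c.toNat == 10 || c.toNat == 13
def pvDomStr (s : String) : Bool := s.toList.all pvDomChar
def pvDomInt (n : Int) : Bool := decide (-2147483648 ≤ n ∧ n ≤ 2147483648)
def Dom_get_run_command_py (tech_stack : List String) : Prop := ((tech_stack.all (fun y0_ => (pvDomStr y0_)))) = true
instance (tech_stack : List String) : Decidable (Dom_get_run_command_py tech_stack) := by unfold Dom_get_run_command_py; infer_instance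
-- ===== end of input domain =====

-- B replaces A's staged if/any group scans with one pass over tech_stack folding a
-- minimum priority looked up in a dict, then indexing a command table (objective: alternative).

-- ===== PORT A =====
-- literal transliteration of A's if-chain with `in`/`any` membership tests
def get_run_command_py (tech_stack : List String) : String :=
  if tech_stack.contains "Rust" then "cargo run"
  else if ["JavaScript", "TypeScript", "React", "Express"].any
      (fun t => tech_stack.contains t) then "npm start"
  else if ["Python", "FastAPI", "Flask", "Django"].any
      (fun t => tech_stack.contains t) then "python main.py"
  else "See documentation"

-- ===== PORT B =====
-- _PRIORITY, a Python dict literal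
def pvPriority : PySem.Dict String Int :=
  PySem.Dict.ofList [("Rust", 0),
    ("JavaScript", 1), ("TypeScript", 1), ("React", 1), ("Express", 1),
    ("Python", 2), ("FastAPI", 2), ("Flask", 2), ("Django", 2)]

-- _COMMANDS
def pvCommands : List String :=
  ["cargo run", "npm start", "python main.py", "See documentation"]

-- the `for t in tech_stack:` loop keeping the smallest priority, then _COMMANDS[best];
-- best always lies in 0..3 so the index is in range and the `.getD ""` default is unreachable
def get_run_command_py_alt (tech_stack : List String) : String :=
  let best := tech_stack.foldl
    (fun best t =>
      let p := pvPriority.getD t 3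
      if p < best then p else best) 3
  (PySem.List.pyGet? pvCommands best).getD ""

-- ===== PRECONDITION & SPEC =====
def Spec_get_run_command_py (tech_stack : List String) (out : String) : Prop := out = get_run_command_py_alt tech_stack
instance (tech_stack : List String) (out : String) : Decidable (Spec_get_run_command_py tech_stack out) := by unfold Spec_get_run_command_py; infer_instance

-- ===== CLAIM (what is proved, stated in full; the proofs are below) =====
def Claim_equal_get_run_command_py : Prop := ∀ (tech_stack : List String), Dom_get_run_command_py tech_stack → Spec_get_run_command_py tech_stack (get_run_command_py tech_stack)

-- ===== LEMMAS AND PROOFS =====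

-- the priority of one tech, and the minimum priority of a list, in recursive form
def pvPrio (t : String) : Int := pvPriority.getD t 3

def pvRecMin : List String → Int
  | [] => 3
  | t :: ts => min (pvPrio t) (pvRecMin ts)

theorem pvPrio_spec (t : String) :
    pvPrio t = if t = "Rust" then 0
      else if t = "JavaScript" ∨ t = "TypeScript" ∨ t = "React" ∨ t = "Express" then 1
      else if t = "Python" ∨ t = "FastAPI" ∨ t = "Flask" ∨ t = "Django" then 2
      else 3 := by
  have h : pvPriority = PySem.Dict.mk [("Rust", 0),
      ("JavaScript", 1), ("TypeScript", 1), ("React", 1), ("Express", 1),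
      ("Python", 2), ("FastAPI", 2), ("Flask", 2), ("Django", 2)] := by decide
  simp only [pvPrio, h, PySem.Dict.getD_eq_get?_getD, PySem.Dict.get?_mk_cons,
    beq_iff_eq]
  by_cases h1 : t = "Rust" <;> by_cases h2 : t = "JavaScript" <;>
    by_cases h3 : t = "TypeScript" <;> by_cases h4 : t = "React" <;>
    by_cases h5 : t = "Express" <;> by_cases h6 : t = "Python" <;>
    by_cases h7 : t = "FastAPI" <;> by_cases h8 : t = "Flask" <;>
    by_cases h9 : t = "Django" <;>
    simp_all [PySem.Dict.get?, eq_comm]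

theorem pvPrio_nonneg (t : String) : 0 ≤ pvPrio t := by
  rw [pvPrio_spec]; split_ifs <;> omega

theorem pvPrio_le_three (t : String) : pvPrio t ≤ 3 := by
  rw [pvPrio_spec]; split_ifs <;> omega

theorem pvFoldl_eq_recMin (ts : List String) (b : Int) (hb : b ≤ 3) :
    ts.foldl (fun best t =>
      let p := pvPriority.getD t 3
      if p < best then p else best) b = min b (pvRecMin ts) := by
  induction ts generalizing b with
  | nil => simp only [List.foldl_nil, pvRecMin, Int.min_def]; split_ifs <;> omega
  | cons t ts ih =>
    have hstep : (if pvPriority.getD t 3 < b then pvPriority.getD t 3 else b)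
        = min b (pvPrio t) := by
      simp only [pvPrio, Int.min_def]; split_ifs <;> omega
    have hle : min b (pvPrio t) ≤ 3 := by
      have := pvPrio_le_three t; omega
    simp only [List.foldl_cons, pvRecMin, hstep, ih _ hle]
    omega

theorem pvRecMin_le_of_mem {t : String} {ts : List String} (h : t ∈ ts) :
    pvRecMin ts ≤ pvPrio t := by
  induction ts with
  | nil => cases h
  | cons s ts ih =>
    rcases List.mem_cons.mp h with rfl | h
    · simp [pvRecMin]
    · have := ih h; simp only [pvRecMin]; omega

theorem pvRecMin_lb {k : Int} {ts : List String} (hk : k ≤ 3)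
    (h : ∀ t ∈ ts, k ≤ pvPrio t) : k ≤ pvRecMin ts := by
  induction ts with
  | nil => simpa [pvRecMin]
  | cons s ts ih =>
    have h1 := h s (List.mem_cons_self ..)
    have h2 := ih fun t ht => h t (List.mem_cons_of_mem _ ht)
    simp only [pvRecMin]; omega

-- ===== VERDICT (by name: the statement is the Claim_ definition above) =====
theorem get_run_command_py_spec : Claim_equal_get_run_command_py := by
  intro ts _
  unfold Spec_get_run_command_py get_run_command_py get_run_command_py_alt
  simp only [pvFoldl_eq_recMin _ _ (by omega : (3:Int) ≤ 3), List.any_cons, List.any_nil,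
    List.contains_eq_mem, Bool.or_eq_true, decide_eq_true_eq]
  split_ifs with hR hJ hP
  · -- Rust in stack: pvRecMin ts = 0
    have h1 := pvRecMin_le_of_mem hR
    rw [pvPrio_spec] at h1; norm_num at h1
    have h2 := pvRecMin_lb (k := 0) (ts := ts) (by omega) fun t _ => pvPrio_nonneg t
    have : min 3 (pvRecMin ts) = 0 := by omega
    rw [this]; rfl
  · -- a JS-group tech in stack, no Rust: pvRecMin ts = 1
    have h1 : pvRecMin ts ≤ 1 := by
      rcases hJ with h | h | h | h | h <;> try exact absurd h not_false
      all_goals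
      · have := pvRecMin_le_of_mem h
        rw [pvPrio_spec] at this; simp at this; omega
    have h2 := pvRecMin_lb (k := 1) (by omega) fun t ht => by
      rw [pvPrio_spec]; split_ifs with e _ _
      · exact absurd (e ▸ ht) hR
      all_goals omega
    have : min 3 (pvRecMin ts) = 1 := by omega
    rw [this]; rfl
  · -- a Python-group tech in stack, nothing above: pvRecMin ts = 2
    have h1 : pvRecMin ts ≤ 2 := by
      rcases hP with h | h | h | h | h <;> try exact absurd h not_false
      all_goals
      · have := pvRecMin_le_of_mem h
        rw [pvPrio_spec] at this; simp at this; omega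
    have h2 := pvRecMin_lb (k := 2) (by omega) fun t ht => by
      rw [pvPrio_spec]; split_ifs with e eJ _
      · exact absurd (e ▸ ht) hR
      · rcases eJ with rfl | rfl | rfl | rfl <;> simp_all
      all_goals omega
    have : min 3 (pvRecMin ts) = 2 := by omega
    rw [this]; rfl
  · -- no known tech: pvRecMin ts = 3
    have h2 := pvRecMin_lb (k := 3) (by omega) fun t ht => by
      rw [pvPrio_spec]; split_ifs with e eJ eP
      · exact absurd (e ▸ ht) hR
      · rcases eJ with rfl | rfl | rfl | rfl <;> simp_all
      · rcases eP with rfl | rfl | rfl | rfl <;> simp_all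
      · omega
    have : min 3 (pvRecMin ts) = 3 := by omega
    rw [this]; rfl
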